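-- pv_equiv track=rewrite | github.com/BaeJihyun97/CodingTest | 프로그래머스/2/150368. 이모티콘 할인행사/이모티콘 할인행사.py | dfs
-- ===== SOURCE A (Python) =====
-- def calculate(discounts, users, emoticons):
--     plus_n, sales = 0, 0
--     emoticons_ = list(zip(discounts, emoticons))
--     for user in users:
--         percent, thr_price = user
--         tot_price = sum([p * (100-d) // 100 for d, p in emoticons_ if d >= percent ])
--         if tot_price >= thr_price:
--             plus_n += 1
--         else:
--             sales += tot_price
--     return plus_n, sales
--
-- def dfs(discounts, depth, max_depth, users, emoticons):
--     if depth == max_depth: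
--         return calculate(discounts, users, emoticons)
--
--     plus_n, sales = 0, 0
--     for disc in [10, 20, 30, 40]:
--         plus_n_, sales_ = dfs(discounts+[disc], depth+1, max_depth, users, emoticons)
--         if plus_n < plus_n_:
--             plus_n, sales = plus_n_, sales_
--         elif plus_n == plus_n_ and sales < sales_:
--             plus_n, sales = plus_n_, sales_
--
--     return plus_n, sales
-- ===== SOURCE B (Python) =====
-- def dfs(discounts, depth, max_depth, users, emoticons):
--     k = max(max_depth - depth, 0)
--     n0 = len(discounts)
--     # per-user total of the already-fixed prefix, computed once
--     base = []
--     for pct, thr in users: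
--         t = 0
--         for d, p in zip(discounts, emoticons):
--             if d >= pct:
--                 t += p * (100 - d) // 100
--         base.append(t)
--     # prices of the k remaining slots (a slot past the emoticon list sells nothing)
--     slots = emoticons[n0:n0 + k]
--     slots += [0] * (k - len(slots))
--
--     def score(totals):
--         plus_n, sales = 0, 0
--         for t, (pct, thr) in zip(totals, users):
--             if t >= thr:
--                 plus_n += 1
--             else:
--                 sales += t
--         return (plus_n, sales)
--
--     def go(slots, totals):
--         if not slots:
--             return score(totals)
--         p, rest = slots[0], slots[1:]
--         best = (0, 0)
--         for disc in (10, 20, 30, 40):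
--             nxt = [t + (p * (100 - disc) // 100 if disc >= pct else 0)
--                    for t, (pct, _) in zip(totals, users)]
--             best = max(best, go(rest, nxt))
--         return best
--
--     return go(slots, base)
-- ===== Notes on version B (the rewrite author's own statement) =====
-- stated objective: alternative
-- what changed: B computes each user's discounted total of the fixed prefix once, then walks the 4-way choice tree carrying per-user running totals updated incrementally per level, instead of A rebuilding the discount list and recomputing every user's full sum from scratch at each leaf; both remain exponential in the number of levels.
-- crash fix: When depth > max_depth A recurses past the base case and raises RecursionError; B treats it as zero remaining slots and returns the score of the already-fixed prefix. — e.g. on dfs([], 1, 0, [], []): A raises RecursionError, B returns (0, 0)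
import Mathlib
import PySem

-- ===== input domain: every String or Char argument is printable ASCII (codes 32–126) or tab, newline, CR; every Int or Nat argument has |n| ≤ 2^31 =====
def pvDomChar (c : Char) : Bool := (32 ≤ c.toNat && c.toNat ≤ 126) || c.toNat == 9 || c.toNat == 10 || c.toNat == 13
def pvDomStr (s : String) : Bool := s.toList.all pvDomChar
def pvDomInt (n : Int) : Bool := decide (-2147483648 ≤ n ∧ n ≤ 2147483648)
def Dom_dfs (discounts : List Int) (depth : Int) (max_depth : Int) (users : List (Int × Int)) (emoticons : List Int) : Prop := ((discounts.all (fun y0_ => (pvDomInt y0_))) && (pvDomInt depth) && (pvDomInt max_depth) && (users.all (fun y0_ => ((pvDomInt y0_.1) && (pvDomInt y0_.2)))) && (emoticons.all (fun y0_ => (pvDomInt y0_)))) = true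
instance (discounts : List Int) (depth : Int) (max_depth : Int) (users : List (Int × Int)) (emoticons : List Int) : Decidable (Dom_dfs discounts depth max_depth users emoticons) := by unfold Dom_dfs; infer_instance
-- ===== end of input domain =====

-- B replaces A's per-leaf recomputation of every user's full sum by per-user running
-- totals carried down the search (one incremental update per level), same results.

-- ===== PORT A =====
-- 'calculate' of A, literally: for each user sum the discounted prices over
-- zip(discounts, emoticons) filtered by d >= percent, then count / accumulate.
def pyCalc (discounts : List Int) (users : List (Int × Int)) (emoticons : List Int) : Int × Int :=
  let ems := discounts.zip emoticons
  users.foldl (fun (st : Int × Int) user =>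
    let tot := ((ems.filter (fun de => decide (de.1 ≥ user.1))).map
        (fun de => PySem.Int.floordiv (de.2 * (100 - de.1)) 100)).sum
    if tot ≥ user.2 then (st.1 + 1, st.2) else (st.1, st.2 + tot)) (0, 0)

-- A recurses on depth+1 until depth == max_depth; the number of remaining levels
-- (max_depth - depth).toNat is the structural fuel (A diverges when depth > max_depth,
-- excluded by Pre_dfs).
def dfsFuel (users : List (Int × Int)) (emoticons : List Int) : Nat → List Int → Int × Int
  | 0, discounts => pyCalc discounts users emoticons
  | fuel + 1, discounts =>
      ([10, 20, 30, 40] : List Int).foldl (fun st disc =>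
        let r := dfsFuel users emoticons fuel (discounts ++ [disc])
        if st.1 < r.1 then r
        else if st.1 = r.1 ∧ st.2 < r.2 then r
        else st) (0, 0)

def dfs (discounts : List Int) (depth : Int) (max_depth : Int) (users : List (Int × Int)) (emoticons : List Int) : Int × Int :=
  dfsFuel users emoticons (max_depth - depth).toNat discounts

-- ===== PORT B =====
-- B: per-user totals of the fixed prefix, computed once.
def baseB (discounts : List Int) (users : List (Int × Int)) (emoticons : List Int) : List Int :=
  users.map (fun u => (discounts.zip emoticons).foldl
    (fun t dp => if dp.1 ≥ u.1 then t + PySem.Int.floordiv (dp.2 * (100 - dp.1)) 100 else t) 0)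

def scoreB (users : List (Int × Int)) (totals : List Int) : Int × Int :=
  (totals.zip users).foldl (fun (st : Int × Int) tu =>
    if tu.1 ≥ tu.2.2 then (st.1 + 1, st.2) else (st.1, st.2 + tu.1)) (0, 0)

def stepB (users : List (Int × Int)) (p disc : Int) (totals : List Int) : List Int :=
  (totals.zip users).map (fun tu =>
    tu.1 + (if disc ≥ tu.2.1 then PySem.Int.floordiv (p * (100 - disc)) 100 else 0))

-- Python's max on pairs: lexicographic, keeps the first argument on ties.
def lexMax (a b : Int × Int) : Int × Int :=
  if a.1 < b.1 ∨ (a.1 = b.1 ∧ a.2 < b.2) then b else a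

def goB (users : List (Int × Int)) : List Int → List Int → Int × Int
  | [], totals => scoreB users totals
  | p :: rest, totals =>
      ([10, 20, 30, 40] : List Int).foldl
        (fun best disc => lexMax best (goB users rest (stepB users p disc totals))) (0, 0)

def dfs_alt (discounts : List Int) (depth : Int) (max_depth : Int) (users : List (Int × Int)) (emoticons : List Int) : Int × Int :=
  let k := (max_depth - depth).toNat
  let n0 := discounts.length
  let slots0 := (emoticons.drop n0).take k
  let slots := slots0 ++ List.replicate (k - slots0.length) 0
  goB users slots (baseB discounts users emoticons)

-- ===== PRECONDITION & SPEC =====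
-- When depth > max_depth, A recurses forever (RecursionError in Python); excluded.
def Pre_dfs (discounts : List Int) (depth : Int) (max_depth : Int) (users : List (Int × Int)) (emoticons : List Int) : Prop :=
  depth ≤ max_depth
instance (discounts : List Int) (depth : Int) (max_depth : Int) (users : List (Int × Int)) (emoticons : List Int) : Decidable (Pre_dfs discounts depth max_depth users emoticons) := by unfold Pre_dfs; infer_instance

def pvWitness_dfs : List Int × Int × Int × (List (Int × Int)) × List Int :=
  ([10], 0, 1, [(20, 100)], [100, 200])

-- A raises RecursionError whenever depth > max_depth; B returns the score of the fixed prefix there.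
def Raises_dfs (discounts : List Int) (depth : Int) (max_depth : Int) (users : List (Int × Int)) (emoticons : List Int) : Prop :=
  max_depth < depth
instance (discounts : List Int) (depth : Int) (max_depth : Int) (users : List (Int × Int)) (emoticons : List Int) : Decidable (Raises_dfs discounts depth max_depth users emoticons) := by unfold Raises_dfs; infer_instance

def pvRaiseWitness_dfs : List Int × Int × Int × (List (Int × Int)) × List Int :=
  ([], 1, 0, [], [])
def pvRaiseWitnessOut_dfs : Int × Int := (0, 0)

def Spec_dfs (discounts : List Int) (depth : Int) (max_depth : Int) (users : List (Int × Int)) (emoticons : List Int) (out : Int × Int) : Prop := out = dfs_alt discounts depth max_depth users emoticons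
instance (discounts : List Int) (depth : Int) (max_depth : Int) (users : List (Int × Int)) (emoticons : List Int) (out : Int × Int) : Decidable (Spec_dfs discounts depth max_depth users emoticons out) := by unfold Spec_dfs; infer_instance

-- ===== CLAIM (what is proved, stated in full; the proofs are below) =====
def Claim_equal_dfs : Prop := ∀ (discounts : List Int) (depth : Int) (max_depth : Int) (users : List (Int × Int)) (emoticons : List Int), Dom_dfs discounts depth max_depth users emoticons → Pre_dfs discounts depth max_depth users emoticons → Spec_dfs discounts depth max_depth users emoticons (dfs discounts depth max_depth users emoticons)

def Claim_raises_dfs : Prop := (∀ (discounts : List Int) (depth : Int) (max_depth : Int) (users : List (Int × Int)) (emoticons : List Int), Dom_dfs discounts depth max_depth users emoticons → Raises_dfs discounts depth max_depth users emoticons → ¬ Pre_dfs discounts depth max_depth users emoticons) ∧ (Dom_dfs (pvRaiseWitness_dfs.1) (pvRaiseWitness_dfs.2.1) (pvRaiseWitness_dfs.2.2.1) (pvRaiseWitness_dfs.2.2.2.1) (pvRaiseWitness_dfs.2.2.2.2) ∧ Raises_dfs (pvRaiseWitness_dfs.1) (pvRaiseWitness_dfs.2.1) (pvRaiseWitness_dfs.2.2.1)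 (pvRaiseWitness_dfs.2.2.2.1) (pvRaiseWitness_dfs.2.2.2.2) ∧ dfs_alt (pvRaiseWitness_dfs.1) (pvRaiseWitness_dfs.2.1) (pvRaiseWitness_dfs.2.2.1) (pvRaiseWitness_dfs.2.2.2.1) (pvRaiseWitness_dfs.2.2.2.2) = pvRaiseWitnessOut_dfs)

-- ===== LEMMAS AND PROOFS =====

-- the slot list B builds, as a function of the remaining levels and prefix length
def slotsFor (emoticons : List Int) (k n0 : Nat) : List Int :=
  let s0 := (emoticons.drop n0).take k
  s0 ++ List.replicate (k - s0.length) 0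

def slotHead (emoticons : List Int) (n0 : Nat) : Int :=
  match emoticons.drop n0 with
  | [] => 0
  | p :: _ => p

theorem slotsFor_succ (emoticons : List Int) (k n0 : Nat) :
    slotsFor emoticons (k + 1) n0 = slotHead emoticons n0 :: slotsFor emoticons k (n0 + 1) := by
  unfold slotsFor slotHead
  have hdrop : emoticons.drop (n0 + 1) = (emoticons.drop n0).tail := by
    rw [← List.drop_drop]; simp
  cases h : emoticons.drop n0 with
  | nil => simp [hdrop, h, List.replicate_succ]
  | cons p t => simp [hdrop, h]

theorem foldl_if_add (pct : Int) (g : Int × Int → Int) :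
    ∀ (l : List (Int × Int)) (t0 : Int),
      l.foldl (fun t dp => if dp.1 ≥ pct then t + g dp else t) t0
        = t0 + ((l.filter (fun de => decide (de.1 ≥ pct))).map g).sum := by
  intro l
  induction l with
  | nil => intro t0; simp
  | cons a l ih =>
      intro t0
      by_cases h : a.1 ≥ pct <;> simp [h, ih] <;> ring

theorem zip_map_self {α β : Type} (f : α → β) (l : List α) :
    (l.map f).zip l = l.map (fun x => (f x, x)) := by
  induction l with
  | nil => rfl
  | cons a l ih => simp [ih]

theorem foldl_congr' {α β : Type} {f g : α → β → α} {a : α} {l : List β}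
    (h : ∀ x ∈ l, ∀ s, f s x = g s x) : l.foldl f a = l.foldl g a := by
  induction l generalizing a with
  | nil => rfl
  | cons x l ih =>
      simp only [List.foldl_cons]
      rw [h x (by simp)]
      exact ih (fun y hy s => h y (by simp [hy]) s)

theorem calc_eq_score (discounts : List Int) (users : List (Int × Int)) (emoticons : List Int) :
    pyCalc discounts users emoticons = scoreB users (baseB discounts users emoticons) := by
  unfold pyCalc scoreB baseB
  rw [zip_map_self, List.foldl_map]
  apply foldl_congr'
  intro u _ st
  simp only []
  rw [foldl_if_add u.1 (fun de => PySem.Int.floordiv (de.2 * (100 - de.1)) 100), zero_add]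

theorem zip_snoc (disc : Int) :
    ∀ (d e : List Int), (d ++ [disc]).zip e = d.zip e ++ ([disc].zip (e.drop d.length)) := by
  intro d
  induction d with
  | nil => intro e; simp
  | cons a d ih =>
      intro e
      cases e with
      | nil => simp
      | cons b e => simp [ih]

theorem base_step (discounts : List Int) (users : List (Int × Int)) (emoticons : List Int) (disc : Int) :
    baseB (discounts ++ [disc]) users emoticons
      = stepB users (slotHead emoticons discounts.length) disc (baseB discounts users emoticons) := by
  unfold baseB stepB slotHead
  rw [zip_map_self, List.map_map]
  apply List.map_congr_left
  intro u _
  simp only [Function.comp]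
  rw [zip_snoc, List.foldl_append]
  cases h : emoticons.drop discounts.length with
  | nil =>
      simp only [List.zip_nil_right, List.foldl_nil]
      split <;> simp [PySem.Int.floordiv]
  | cons p t =>
      simp only [List.zip_cons_cons, List.zip_nil_left, List.foldl_cons, List.foldl_nil]
      split <;> simp

theorem update_eq_lexMax (st r : Int × Int) :
    (if st.1 < r.1 then r else if st.1 = r.1 ∧ st.2 < r.2 then r else st) = lexMax st r := by
  unfold lexMax
  split_ifs with h1 h2 h3 h3 <;> first | rfl | (exfalso; omega)

theorem dfsFuel_eq_goB (users : List (Int × Int)) (emoticons : List Int) :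
    ∀ (k : Nat) (discounts : List Int),
      dfsFuel users emoticons k discounts
        = goB users (slotsFor emoticons k discounts.length) (baseB discounts users emoticons) := by
  intro k
  induction k with
  | zero =>
      intro d
      simp [dfsFuel, slotsFor, goB, calc_eq_score]
  | succ k ih =>
      intro d
      rw [slotsFor_succ]
      show dfsFuel users emoticons (k + 1) d = _
      simp only [dfsFuel, goB]
      apply foldl_congr'
      intro disc _ st
      rw [update_eq_lexMax, ih (d ++ [disc]), base_step]
      simp

-- ===== VERDICT (by name: the statement is the Claim_ definition above) =====
theorem dfs_spec : Claim_equal_dfs := by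
  intro discounts depth max_depth users emoticons _ _
  show dfs discounts depth max_depth users emoticons = dfs_alt discounts depth max_depth users emoticons
  unfold dfs dfs_alt
  rw [dfsFuel_eq_goB]
  rfl

@[simp] theorem dfs_raises : Claim_raises_dfs := by
  unfold Claim_raises_dfs
  constructor
  · intro _ depth max_depth _ _ _ h hpre
    exact absurd hpre (by unfold Pre_dfs Raises_dfs at *; omega)
  · exact ⟨by decide, by decide, by decide⟩
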